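-- pv_equiv track=rewrite | github.com/UUDigitalHumanitieslab/sasta | backend/sastadev/astaforms.py | resultdict2table
-- ===== SOURCE A (Python) =====
-- def dictget(dct, keyname):
--     if keyname in dct:
--         result = dct[keyname]
--     else:
--         result = ''
--     return result
--
-- def resultdict2table(resultdict):
--     table = []
--     for uttid in resultdict:
--         uttid_dict = resultdict[uttid]
--         wc = dictget(uttid_dict, 'wc')
--         correct = dictget(uttid_dict, 'correct')
--         if correct != '':
--             correct = 'J'
--         okpvs = dictget(uttid_dict, 'okpvs')
--         foutepvs = dictget(uttid_dict, 'foutepvs')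
--         bijzincount = dictget(uttid_dict, 'bijzincount')
--         remarks = dictget(uttid_dict, 'remarks')
--         paddeduttid = str(uttid).rjust(3, '0')
--         newrow = [paddeduttid, wc, correct, okpvs, foutepvs, bijzincount, remarks]
--         table.append(newrow)
--     sortedtable = sorted(table, key=lambda row: row[0])
--     return sortedtable
-- ===== SOURCE B (Python) =====
-- def resultdict2table(resultdict):
--     def pad(u):
--         return str(u).rjust(3, '0')
--     remaining = list(resultdict)
--     table = []
--     while remaining:
--         m = min(remaining, key=pad)
--         remaining.remove(m)
--         sub = resultdict[m]
--         correct = 'J' if sub.get('correct', '') != '' else ''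
--         table.append([pad(m), sub.get('wc', ''), correct,
--                       sub.get('okpvs', ''), sub.get('foutepvs', ''),
--                       sub.get('bijzincount', ''), sub.get('remarks', '')])
--     return table
-- ===== Notes on version B (the rewrite author's own statement) =====
-- stated objective: alternative
-- what changed: B never calls sort: it does a selection-style pass, repeatedly extracting the key with the smallest padded representation from the remaining keys and emitting that key's row immediately, instead of building all rows in insertion order and then sorting the row list by its first column.
import Mathlib
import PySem

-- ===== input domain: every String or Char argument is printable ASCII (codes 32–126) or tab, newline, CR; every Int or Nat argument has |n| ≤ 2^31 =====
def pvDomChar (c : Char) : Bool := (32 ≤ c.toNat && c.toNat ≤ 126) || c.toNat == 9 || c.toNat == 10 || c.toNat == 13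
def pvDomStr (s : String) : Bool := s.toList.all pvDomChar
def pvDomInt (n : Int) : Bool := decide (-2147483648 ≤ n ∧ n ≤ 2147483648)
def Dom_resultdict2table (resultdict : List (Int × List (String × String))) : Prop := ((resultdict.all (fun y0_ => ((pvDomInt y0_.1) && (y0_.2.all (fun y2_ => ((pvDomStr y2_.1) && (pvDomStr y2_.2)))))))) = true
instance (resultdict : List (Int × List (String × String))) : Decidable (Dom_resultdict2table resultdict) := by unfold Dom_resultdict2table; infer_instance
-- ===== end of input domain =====

-- B replaces build-rows-then-sort by a sort-free selection loop: it repeatedly extracts the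
-- remaining key with the smallest padded representation and emits that key's row immediately
-- (alternative decomposition; not claimed faster).


-- s.rjust(3, '0'), exact for any string (used by both ports: both Pythons pad this way)
def pyRjust3Zero (s : String) : String :=
  String.mk (List.replicate (3 - s.toList.length) '0' ++ s.toList)

-- ===== PORT A =====
def dictget (dct : PySem.Dict String String) (keyname : String) : String :=
  if dct.contains keyname then (dct.get? keyname).getD "" else ""

def resultdict2table (resultdict : List (Int × List (String × String))) : List (List String) :=
  let d := PySem.Dict.ofList resultdict
  let table := d.keys.foldl (fun table uttid =>
    let uttid_dict := PySem.Dict.ofList ((d.get? uttid).getD [])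
    let wc := dictget uttid_dict "wc"
    let correct0 := dictget uttid_dict "correct"
    let correct := if correct0 ≠ "" then "J" else correct0
    let okpvs := dictget uttid_dict "okpvs"
    let foutepvs := dictget uttid_dict "foutepvs"
    let bijzincount := dictget uttid_dict "bijzincount"
    let remarks := dictget uttid_dict "remarks"
    let paddeduttid := pyRjust3Zero (PySem.Int.toStr uttid)
    table ++ [[paddeduttid, wc, correct, okpvs, foutepvs, bijzincount, remarks]]) []
  PySem.List.sorted table (fun row => PySem.List.pyGetD row 0 "") false

-- ===== PORT B =====
-- pad(u) = str(u).rjust(3, '0')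
def bPad (u : Int) : String := pyRjust3Zero (PySem.Int.toStr u)

-- the row built for key m: [pad(m), sub.get('wc',''), correct, …]
def bRow (d : PySem.Dict Int (List (String × String))) (m : Int) : List String :=
  let sub := PySem.Dict.ofList ((d.get? m).getD [])
  let correct := if sub.getD "correct" "" ≠ "" then "J" else ""
  [bPad m, sub.getD "wc" "", correct, sub.getD "okpvs" "",
   sub.getD "foutepvs" "", sub.getD "bijzincount" "", sub.getD "remarks" ""]

-- the while loop: m = min(remaining, key=pad); remaining.remove(m); emit the row; repeat.
-- fuel = initial length of remaining: a totality guard only (each pass removes one element);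
-- the inner .getD [] is unreachable too (m ∈ remaining, list.remove cannot raise).
def bLoop (d : PySem.Dict Int (List (String × String))) : Nat → List Int → List (List String)
  | 0, _ => []
  | Nat.succ n, remaining =>
    match PySem.List.min? remaining bPad with
    | none => []
    | some m => bRow d m :: bLoop d n ((PySem.List.remove? remaining m).getD [])

def resultdict2table_alt (resultdict : List (Int × List (String × String))) : List (List String) :=
  let d := PySem.Dict.ofList resultdict
  bLoop d d.keys.length d.keys

-- ===== PRECONDITION & SPEC =====
def Spec_resultdict2table (resultdict : List (Int × List (String × String))) (out : List (List String)) : Prop := out = resultdict2table_alt resultdict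
instance (resultdict : List (Int × List (String × String))) (out : List (List String)) : Decidable (Spec_resultdict2table resultdict out) := by unfold Spec_resultdict2table; infer_instance

-- ===== CLAIM (what is proved, stated in full; the proofs are below) =====
def Claim_equal_resultdict2table : Prop := ∀ (resultdict : List (Int × List (String × String))), Dom_resultdict2table resultdict → Spec_resultdict2table resultdict (resultdict2table resultdict)

-- ===== LEMMAS AND PROOFS =====

theorem dictget_eq_getD (d : PySem.Dict String String) (k : String) :
    dictget d k = d.getD k "" := by
  unfold dictget PySem.Dict.getD
  by_cases h : d.contains k = true
  · simp [h]
  · simp [h]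
    cases hg : d.get? k with
    | none => rfl
    | some v =>
      have hn : d.get? k = none := by
        rw [PySem.Dict.get?_eq_none_iff_contains]
        simpa using h
      simp [hg] at hn

-- proof-side selection sort: the key order bLoop visits, abstracted from the rows
def selSort {α κ : Type} [LinearOrder κ] [DecidableEq α] (key : α → κ) : Nat → List α → List α
  | 0, _ => []
  | Nat.succ n, l =>
    match PySem.List.min? l key with
    | none => []
    | some m => m :: selSort key n ((PySem.List.remove? l m).getD [])

theorem bLoop_eq_map_selSort (d : PySem.Dict Int (List (String × String))) (fuel : Nat) (l : List Int) :
    bLoop d fuel l = (selSort bPad fuel l).map (bRow d) := by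
  induction fuel generalizing l with
  | zero => rfl
  | succ n ih =>
    rw [bLoop, selSort]
    cases hmin : PySem.List.min? l bPad with
    | none => simp
    | some m => simp [ih]

theorem min?_append_singleton {α κ : Type} [LinearOrder κ] (key : α → κ) (xs : List α) (x : α) :
    PySem.List.min? (xs ++ [x]) key =
      match PySem.List.min? xs key with
      | none => some x
      | some m => if key x < key m then some x else some m := by
  simp only [PySem.List.min?, List.foldl_append, List.foldl_cons, List.foldl_nil]
  rfl

theorem sorted_append_singleton {α κ : Type} [LinearOrder κ] (key : α → κ) (xs : List α) (x : α) :
    PySem.List.sorted (xs ++ [x]) key false =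
      PySem.List.insertBy (fun a b => decide (key a < key b)) x (PySem.List.sorted xs key false) := by
  rw [PySem.List.sorted_eq_foldl_insertBy, PySem.List.sorted_eq_foldl_insertBy,
      List.foldl_append, List.foldl_cons, List.foldl_nil]

theorem insertBy_cons_of_all (before : α → α → Bool) (x : α) (s : List α)
    (h : ∀ y ∈ s, before x y = true) :
    PySem.List.insertBy before x s = x :: s := by
  cases s with
  | nil => rfl
  | cons y ys => simp [PySem.List.insertBy, h y (by simp)]

-- head of the stable insertion sort is the FIRST key-minimal element, and the tail is the sort of the rest
theorem sorted_min_cons {α κ : Type} [LinearOrder κ] [DecidableEq α] (key : α → κ)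
    (l : List α) (m : α) (h : PySem.List.min? l key = some m) :
    PySem.List.sorted l key false = m :: PySem.List.sorted (l.erase m) key false := by
  induction l using List.reverseRecOn with
  | nil => simp [PySem.List.min?] at h
  | append_singleton xs x ih =>
    rw [min?_append_singleton] at h
    cases hxs : PySem.List.min? xs key with
    | none =>
      have hnil : xs = [] := (PySem.List.min?_eq_none_iff xs key).1 hxs
      subst hnil
      simp only [hxs] at h
      cases h
      simp [PySem.List.sorted, PySem.List.insertBy]
    | some m' =>
      simp only [hxs] at h
      by_cases hlt : key x < key m'
      · simp only [if_pos hlt] at h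
        cases h
        have hnotmem : m ∉ xs := by
          intro hmem
          exact absurd (PySem.List.min?_isMin hxs m hmem) (not_le.mpr hlt)
        rw [List.erase_append_right _ hnotmem, List.erase_cons_head, List.append_nil]
        rw [sorted_append_singleton]
        apply insertBy_cons_of_all
        intro y hy
        have hymem : y ∈ xs := (PySem.List.mem_sorted xs key false y).1 hy
        have := PySem.List.min?_isMin hxs y hymem
        simp [lt_of_lt_of_le hlt this]
      · simp only [if_neg hlt] at h
        cases h
        have hmem : m ∈ xs := PySem.List.min?_mem hxs
        rw [List.erase_append_left _ hmem]
        rw [sorted_append_singleton, sorted_append_singleton, ih hxs]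
        simp [PySem.List.insertBy, hlt]

theorem selSort_eq_sorted {α κ : Type} [LinearOrder κ] [DecidableEq α] (key : α → κ)
    (fuel : Nat) (l : List α) (hf : l.length ≤ fuel) :
    selSort key fuel l = PySem.List.sorted l key false := by
  induction fuel generalizing l with
  | zero =>
    have : l = [] := List.eq_nil_of_length_eq_zero (by omega)
    subst this; rfl
  | succ n ih =>
    rw [selSort]
    cases hmin : PySem.List.min? l key with
    | none =>
      have hnil : l = [] := (PySem.List.min?_eq_none_iff l key).1 hmin
      subst hnil; rfl
    | some m =>
      have hm : m ∈ l := PySem.List.min?_mem hmin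
      have hrem : PySem.List.remove? l m = some (l.erase m) :=
        PySem.List.remove?_eq_some_erase l m hm
      have hlen : (l.erase m).length = l.length - 1 := List.length_erase_of_mem hm
      have hpos : 0 < l.length := List.length_pos_of_mem hm
      show m :: selSort key n ((PySem.List.remove? l m).getD []) = PySem.List.sorted l key false
      rw [hrem, Option.getD_some, ih (l.erase m) (by omega), sorted_min_cons key l m hmin]

theorem map_insertBy {α β : Type} (f : α → β) (bα : α → α → Bool) (bβ : β → β → Bool)
    (h : ∀ a b, bβ (f a) (f b) = bα a b) (x : α) (l : List α) :
    PySem.List.insertBy bβ (f x) (l.map f) = (PySem.List.insertBy bα x l).map f := by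
  induction l with
  | nil => rfl
  | cons y ys ih =>
    simp only [List.map_cons, PySem.List.insertBy, h]
    by_cases hb : bα x y = true
    · simp [hb]
    · simp [hb, ih]

theorem foldl_insertBy_map {α β κ : Type} [LinearOrder κ] (f : α → β) (k : β → κ)
    (xs : List α) (acc : List α) :
    (xs.map f).foldl (fun a x => PySem.List.insertBy (fun a b => decide (k a < k b)) x a) (acc.map f)
      = (xs.foldl (fun a x => PySem.List.insertBy (fun a b => decide (k (f a) < k (f b))) x a) acc).map f := by
  induction xs generalizing acc with
  | nil => rfl
  | cons x xs ih =>
    simp only [List.map_cons, List.foldl_cons]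
    rw [map_insertBy f (fun a b => decide (k (f a) < k (f b))) (fun a b => decide (k a < k b)) (fun _ _ => rfl)]
    exact ih _

theorem sorted_map {α β κ : Type} [LinearOrder κ] (f : α → β) (k : β → κ) (xs : List α) :
    PySem.List.sorted (xs.map f) k false = (PySem.List.sorted xs (fun x => k (f x)) false).map f := by
  rw [PySem.List.sorted_eq_foldl_insertBy, PySem.List.sorted_eq_foldl_insertBy]
  have := foldl_insertBy_map f k xs []
  simpa using this

-- ===== VERDICT (by name: the statement is the Claim_ definition above) =====
theorem resultdict2table_spec : Claim_equal_resultdict2table := by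
  intro resultdict _
  unfold Spec_resultdict2table resultdict2table resultdict2table_alt
  simp only []
  set d := PySem.Dict.ofList resultdict with hd
  set g := fun uttid : Int =>
    [pyRjust3Zero (PySem.Int.toStr uttid),
     dictget (PySem.Dict.ofList ((d.get? uttid).getD [])) "wc",
     (if dictget (PySem.Dict.ofList ((d.get? uttid).getD [])) "correct" ≠ "" then "J"
      else dictget (PySem.Dict.ofList ((d.get? uttid).getD [])) "correct"),
     dictget (PySem.Dict.ofList ((d.get? uttid).getD [])) "okpvs",
     dictget (PySem.Dict.ofList ((d.get? uttid).getD [])) "foutepvs",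
     dictget (PySem.Dict.ofList ((d.get? uttid).getD [])) "bijzincount",
     dictget (PySem.Dict.ofList ((d.get? uttid).getD [])) "remarks"] with hg
  have hfold : d.keys.foldl (fun table uttid => table ++ [g uttid]) [] = d.keys.map g := by
    simpa using PySem.List.foldl_append_singleton_eq_map g d.keys []
  rw [hfold, sorted_map g (fun row => PySem.List.pyGetD row 0 "")]
  have hkey : (fun x : Int => PySem.List.pyGetD (g x) 0 "") = bPad := by
    funext u
    simp [hg, bPad, PySem.List.pyGetD_zero_cons]
  rw [hkey, bLoop_eq_map_selSort, selSort_eq_sorted bPad d.keys.length d.keys (le_refl _)]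
  apply List.map_congr_left
  intro u _
  simp only [hg, bRow, bPad, dictget_eq_getD]
  by_cases hc : PySem.Dict.getD (PySem.Dict.ofList ((d.get? u).getD [])) "correct" "" = ""
  · simp [hc]
  · simp [hc]
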